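-- pv_equiv track=rewrite | github.com/ptrocki/cv-project | textRegions.py | removeAmbiguous
-- ===== SOURCE A (Python) =====
-- def removeAmbiguous(bboxes, ambiguityThreshold = 3):
--     new = list(bboxes)
--     toRemove = []
--
--     i = 0
--     while i < len(new):
--         j = i + 1
--         bb = new[i]
--
--         while j < len(new):
--             bb2 = new[j]
--             isSimilar = abs(bb[0] - bb2[0]) < ambiguityThreshold
--             isSimilar = isSimilar and abs(bb[1] - bb2[1]) < ambiguityThreshold
--             isSimilar = isSimilar and abs(bb[2] - bb2[2]) < ambiguityThreshold
--             isSimilar = isSimilar and abs(bb[3] - bb2[3]) < ambiguityThreshold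
--
--             if isSimilar:
--                 try:
--                     toRemove.index(j)
--                 except ValueError:
--                     toRemove.append(j)
--
--             j += 1
--
--         i += 1
--
--     for j in sorted(toRemove, reverse=True):
--         new.pop(j)
--
--     return new
-- ===== SOURCE B (Python) =====
-- def _isSimilar(a, b, t):
--     return abs(a[0] - b[0]) < t and abs(a[1] - b[1]) < t \
--         and abs(a[2] - b[2]) < t and abs(a[3] - b[3]) < t
--
-- def removeAmbiguous(bboxes, ambiguityThreshold = 3):
--     # keep a box iff no earlier box (in the original list) is similar to it
--     kept = []
--     for j, bb in enumerate(bboxes):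
--         if not any(_isSimilar(prev, bb, ambiguityThreshold) for prev in bboxes[:j]):
--             kept.append(bb)
--     return kept
-- ===== Notes on version B (the rewrite author's own statement) =====
-- stated objective: faster
-- what changed: A marks duplicate indices in a toRemove list (deduplicated by a linear toRemove.index scan per hit), then sorts them descending and pops each from a copy; B is a single forward filter that keeps a box iff no earlier box of the original list is L-inf-similar to it, with no index list, no sort and no pops.
import Mathlib
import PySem

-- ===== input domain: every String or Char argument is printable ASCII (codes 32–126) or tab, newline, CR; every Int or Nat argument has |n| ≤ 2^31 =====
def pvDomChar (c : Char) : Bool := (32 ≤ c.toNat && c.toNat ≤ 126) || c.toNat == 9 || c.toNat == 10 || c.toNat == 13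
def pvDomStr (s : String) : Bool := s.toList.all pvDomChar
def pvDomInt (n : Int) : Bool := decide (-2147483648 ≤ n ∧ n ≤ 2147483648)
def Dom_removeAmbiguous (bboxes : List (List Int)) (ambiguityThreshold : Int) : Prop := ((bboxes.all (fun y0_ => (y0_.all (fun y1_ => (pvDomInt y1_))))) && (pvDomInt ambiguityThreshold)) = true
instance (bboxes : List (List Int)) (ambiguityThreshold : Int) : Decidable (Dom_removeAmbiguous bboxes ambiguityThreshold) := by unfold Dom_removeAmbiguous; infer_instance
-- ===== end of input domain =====

-- B replaces A's mark-indices / index-scan-dedup / pop-descending scheme with a single forward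
-- filter: keep a box iff no earlier box of the original list is similar to it.

-- ===== PORT A =====
-- abs(bb[0]-bb2[0]) < t and ... and abs(bb[3]-bb2[3]) < t  (shared by both ports, as in both Pythons)
def pvSim (bb bb2 : List Int) (t : Int) : Bool :=
  decide (|PySem.List.pyGetD bb 0 0 - PySem.List.pyGetD bb2 0 0| < t) &&
  decide (|PySem.List.pyGetD bb 1 0 - PySem.List.pyGetD bb2 1 0| < t) &&
  decide (|PySem.List.pyGetD bb 2 0 - PySem.List.pyGetD bb2 2 0| < t) &&
  decide (|PySem.List.pyGetD bb 3 0 - PySem.List.pyGetD bb2 3 0| < t)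

def removeAmbiguous (bboxes : List (List Int)) (ambiguityThreshold : Int) : List (List Int) :=
  let new := bboxes
  let toRemove : List Int :=
    (PySem.List.pyRange 0 (PySem.List.len new) 1).foldl (fun acc i =>
      let bb := PySem.List.pyGetD new i []
      (PySem.List.pyRange (i + 1) (PySem.List.len new) 1).foldl (fun acc j =>
        let bb2 := PySem.List.pyGetD new j []
        if pvSim bb bb2 ambiguityThreshold then
          match PySem.List.index? acc j with
          | some _ => acc
          | none => acc ++ [j]
        else acc) acc) []
  (PySem.List.sorted toRemove id true).foldl (fun st j =>
    match PySem.List.pop? st j with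
    | some r => r.2
    | none => st) new

-- ===== PORT B =====
def removeAmbiguous_alt (bboxes : List (List Int)) (ambiguityThreshold : Int) : List (List Int) :=
  -- for j, bb in enumerate(bboxes): append bb unless some box of bboxes[:j] is similar
  (PySem.List.enumerate bboxes 0).foldl (fun kept p =>
    if ! (PySem.List.slice bboxes none (some p.1)).any (fun prev => pvSim prev p.2 ambiguityThreshold)
    then kept ++ [p.2] else kept) []

-- ===== PRECONDITION & SPEC =====
-- Pre_ admits exactly the inputs on which A returns: every pair of bboxes must either both
-- have at least 4 coordinates, or differ by at least the threshold in some coordinate present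
-- in both (then the `and` chain short-circuits); otherwise A's similarity check reaches a
-- missing coordinate and raises IndexError.
def Pre_removeAmbiguous (bboxes : List (List Int)) (ambiguityThreshold : Int) : Prop :=
  List.Pairwise (fun u v => (4 ≤ u.length ∧ 4 ≤ v.length) ∨
    ∃ c < min (min u.length v.length) 4, ambiguityThreshold ≤ |u.getD c 0 - v.getD c 0|) bboxes
instance (bboxes : List (List Int)) (ambiguityThreshold : Int) : Decidable (Pre_removeAmbiguous bboxes ambiguityThreshold) := by unfold Pre_removeAmbiguous; infer_instance
def pvWitness_removeAmbiguous : List (List Int) × Int := ([[0, 0, 10, 10], [1, 1, 11, 11], [50, 0, 60, 10]], 3)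

def Spec_removeAmbiguous (bboxes : List (List Int)) (ambiguityThreshold : Int) (out : List (List Int)) : Prop := out = removeAmbiguous_alt bboxes ambiguityThreshold
instance (bboxes : List (List Int)) (ambiguityThreshold : Int) (out : List (List Int)) : Decidable (Spec_removeAmbiguous bboxes ambiguityThreshold out) := by unfold Spec_removeAmbiguous; infer_instance

-- ===== CLAIM (what is proved, stated in full; the proofs are below) =====
def Claim_equal_removeAmbiguous : Prop := ∀ (bboxes : List (List Int)) (ambiguityThreshold : Int), Dom_removeAmbiguous bboxes ambiguityThreshold → Pre_removeAmbiguous bboxes ambiguityThreshold → Spec_removeAmbiguous bboxes ambiguityThreshold (removeAmbiguous bboxes ambiguityThreshold)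

-- ===== LEMMAS AND PROOFS =====

-- the common normal form of both ports: keep l[j] iff p j is false
def pvKeep (l : List (List Int)) (p : Nat → Bool) : List (List Int) :=
  (List.range l.length).filterMap (fun j => if p j then none else l[j]?)

theorem pvKeep_cons (a : List Int) (l : List (List Int)) (p : Nat → Bool) :
    pvKeep (a :: l) p = (if p 0 then [] else [a]) ++ pvKeep l (fun k => p (k + 1)) := by
  unfold pvKeep
  rw [List.length_cons, List.range_succ_eq_map, List.filterMap_cons, List.filterMap_map]
  by_cases h : p 0 <;> simp [h]

theorem pvKeep_congr (l : List (List Int)) (p q : Nat → Bool)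
    (h : ∀ k, k < l.length → p k = q k) : pvKeep l p = pvKeep l q := by
  unfold pvKeep
  exact List.filterMap_congr (fun k hk => by rw [h k (List.mem_range.mp hk)])

theorem pvKeep_false (l : List (List Int)) (p : Nat → Bool) (h : ∀ k, p k = false) :
    pvKeep l p = l := by
  induction l generalizing p with
  | nil => rfl
  | cons a l ih =>
      rw [pvKeep_cons, h 0, ih _ (fun k => h (k + 1))]
      simp

theorem pvKeep_eraseIdx (l : List (List Int)) (j : Nat) (p : Nat → Bool)
    (hj : ∀ k, j ≤ k → p k = false) :
    pvKeep (l.eraseIdx j) p = pvKeep l (fun k => k == j || p k) := by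
  induction l generalizing j p with
  | nil => rfl
  | cons a l ih =>
      cases j with
      | zero =>
          rw [List.eraseIdx_cons_zero, pvKeep_cons]
          rw [pvKeep_false l p (fun k => hj k (Nat.zero_le k)),
              pvKeep_false l _ (fun k => by simp [hj (k+1) (Nat.zero_le _)])]
          simp
      | succ j =>
          rw [List.eraseIdx_cons_succ, pvKeep_cons, pvKeep_cons]
          rw [ih j (fun k => p (k+1)) (fun k hk => hj (k+1) (by omega))]
          have h0 : ((0 == j + 1) || p 0) = p 0 := by simp
          rw [h0]
          congr 1
          apply pvKeep_congr
          intro k _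
          simp

theorem pvPop_desc (l : List (List Int)) (idxs : List Nat)
    (hs : idxs.Pairwise (· > ·)) (hb : ∀ j ∈ idxs, j < l.length) :
    idxs.foldl (fun (st : List (List Int)) (j : Nat) =>
      match PySem.List.pop? st (j : Int) with
      | some r => r.2
      | none => st) l = pvKeep l (fun k => decide (k ∈ idxs)) := by
  induction idxs generalizing l with
  | nil =>
      rw [List.foldl_nil]
      rw [pvKeep_false l _ (fun k => by simp)]
  | cons j idxs ih =>
      have hj : j < l.length := hb j (List.mem_cons_self ..)
      have hrest : ∀ k ∈ idxs, k < j := fun k hk => (List.pairwise_cons.mp hs).1 k hk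
      rw [List.foldl_cons]
      rw [PySem.List.pop?_natCast l j hj]
      rw [ih (l.eraseIdx j) ((List.pairwise_cons.mp hs).2)
          (fun k hk => by rw [List.length_eraseIdx_of_lt hj]; have := hrest k hk; omega)]
      rw [pvKeep_eraseIdx l j _ (fun k hk => by
        simp only [decide_eq_false_iff_not]
        intro hmem; exact absurd hk (by have := hrest k hmem; omega))]
      apply pvKeep_congr
      intro k _
      by_cases h1 : k = j <;> simp [h1]

def pvInner (bboxes : List (List Int)) (t : Int) (bb : List Int) (a b : Int) (acc : List Int) : List Int :=
  (PySem.List.pyRange a b 1).foldl (fun acc j =>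
    let bb2 := PySem.List.pyGetD bboxes j []
    if pvSim bb bb2 t then
      match PySem.List.index? acc j with
      | some _ => acc
      | none => acc ++ [j]
    else acc) acc

theorem pvInner_char (bboxes : List (List Int)) (t : Int) (bb : List Int) :
    ∀ (n : Nat) (a b : Int), (b - a).toNat = n → ∀ acc : List Int,
    (∀ x, x ∈ pvInner bboxes t bb a b acc ↔
      x ∈ acc ∨ (a ≤ x ∧ x < b ∧ pvSim bb (PySem.List.pyGetD bboxes x []) t = true))
    ∧ (acc.Nodup → (pvInner bboxes t bb a b acc).Nodup) := by
  intro n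
  induction n with
  | zero =>
      intro a b hn acc
      rw [pvInner, PySem.List.pyRange_one_eq_nil (by omega), List.foldl_nil]
      refine ⟨fun x => ⟨Or.inl, ?_⟩, id⟩
      rintro (h | ⟨h1, h2, _⟩)
      · exact h
      · omega
  | succ n ih =>
      intro a b hn acc
      have hab : a < b := by omega
      rw [pvInner, PySem.List.pyRange_one_cons hab, List.foldl_cons]
      -- the step
      set acc1 := (if pvSim bb (PySem.List.pyGetD bboxes a []) t then
          match PySem.List.index? acc a with
          | some _ => acc
          | none => acc ++ [a]
        else acc) with hacc1
      have hmem1 : ∀ x, x ∈ acc1 ↔ x ∈ acc ∨ (x = a ∧ pvSim bb (PySem.List.pyGetD bboxes a []) t = true) := by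
        intro x
        rw [hacc1]
        split_ifs with hsim
        · rcases h : PySem.List.index? acc a with _ | k
          · have ha : a ∉ acc := (PySem.List.index?_eq_none_iff acc a).mp h
            simp only [List.mem_append, List.mem_singleton]
            constructor
            · rintro (h1 | h1)
              · exact Or.inl h1
              · exact Or.inr ⟨h1, hsim⟩
            · rintro (h1 | ⟨h1, _⟩)
              · exact Or.inl h1
              · exact Or.inr h1
          · have ha : a ∈ acc := by
              have := (PySem.List.index?_isSome_iff acc a); rw [h] at this; simpa using this
            constructor
            · exact Or.inl
            · rintro (h1 | ⟨h1, _⟩)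
              · exact h1
              · exact h1 ▸ ha
        · constructor
          · exact Or.inl
          · rintro (h1 | ⟨h1, h2⟩)
            · exact h1
            · exact absurd (h1 ▸ h2) hsim
      have hnd1 : acc.Nodup → acc1.Nodup := by
        intro hnd
        rw [hacc1]
        split_ifs with hsim
        · rcases h : PySem.List.index? acc a with _ | k
          · have ha : a ∉ acc := (PySem.List.index?_eq_none_iff acc a).mp h
            simp only [List.nodup_append, List.nodup_singleton, true_and, hnd]
            intro a1 h1 he hm
            rw [List.mem_singleton] at hm
            subst hm
            exact fun heq => ha (heq ▸ h1)
          · exact hnd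
        · exact hnd
      obtain ⟨ihm, ihn⟩ := ih (a + 1) b (by omega) acc1
      rw [pvInner] at ihm ihn
      refine ⟨fun x => ?_, fun hnd => ihn (hnd1 hnd)⟩
      rw [ihm x, hmem1 x]
      constructor
      · rintro ((h | ⟨rfl, hs⟩) | ⟨h1, h2, h3⟩)
        · exact Or.inl h
        · exact Or.inr ⟨le_refl _, hab, hs⟩
        · exact Or.inr ⟨by omega, h2, h3⟩
      · rintro (h | ⟨h1, h2, h3⟩)
        · exact Or.inl (Or.inl h)
        · by_cases hx : x = a
          · exact Or.inl (Or.inr ⟨hx, hx ▸ h3⟩)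
          · exact Or.inr ⟨by omega, h2, h3⟩

def pvOuter (bboxes : List (List Int)) (t : Int) (a : Int) (acc : List Int) : List Int :=
  (PySem.List.pyRange a (PySem.List.len bboxes) 1).foldl (fun acc i =>
    let bb := PySem.List.pyGetD bboxes i []
    pvInner bboxes t bb (i + 1) (PySem.List.len bboxes) acc) acc

theorem pvOuter_char (bboxes : List (List Int)) (t : Int) :
    ∀ (n : Nat) (a : Int), ((bboxes.length : Int) - a).toNat = n → ∀ acc : List Int,
    (∀ x, x ∈ pvOuter bboxes t a acc ↔
      x ∈ acc ∨ ∃ i : Int, a ≤ i ∧ i + 1 ≤ x ∧ x < (bboxes.length : Int) ∧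
        pvSim (PySem.List.pyGetD bboxes i []) (PySem.List.pyGetD bboxes x []) t = true)
    ∧ (acc.Nodup → (pvOuter bboxes t a acc).Nodup) := by
  intro n
  induction n with
  | zero =>
      intro a hn acc
      rw [pvOuter, PySem.List.len_eq, PySem.List.pyRange_one_eq_nil (by omega), List.foldl_nil]
      refine ⟨fun x => ⟨Or.inl, ?_⟩, id⟩
      rintro (h | ⟨i, h1, h2, h3, _⟩)
      · exact h
      · omega
  | succ n ih =>
      intro a hn acc
      have hab : a < (bboxes.length : Int) := by omega
      rw [pvOuter, PySem.List.len_eq, PySem.List.pyRange_one_cons hab, List.foldl_cons]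
      obtain ⟨im, ind⟩ := pvInner_char bboxes t (PySem.List.pyGetD bboxes a []) _ (a + 1)
        (bboxes.length : Int) rfl acc
      obtain ⟨ihm, ihn⟩ := ih (a + 1) (by omega)
        (pvInner bboxes t (PySem.List.pyGetD bboxes a []) (a + 1) (bboxes.length : Int) acc)
      rw [pvOuter, PySem.List.len_eq] at ihm ihn
      refine ⟨fun x => ?_, fun hnd => ihn (ind hnd)⟩
      rw [ihm x, im x]
      constructor
      · rintro ((h | ⟨h1, h2, h3⟩) | ⟨i, h1, h2, h3, h4⟩)
        · exact Or.inl h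
        · exact Or.inr ⟨a, le_refl _, h1, h2, h3⟩
        · exact Or.inr ⟨i, by omega, h2, h3, h4⟩
      · rintro (h | ⟨i, h1, h2, h3, h4⟩)
        · exact Or.inl (Or.inl h)
        · by_cases hi : i = a
          · exact Or.inl (Or.inr ⟨by omega, h3, hi ▸ h4⟩)
          · exact Or.inr ⟨i, by omega, h2, h3, h4⟩

-- the bad-index predicate: some strictly earlier box is similar
def pvBad (bboxes : List (List Int)) (t : Int) (j : Nat) : Bool :=
  decide (∃ i : Nat, i < j ∧ pvSim (bboxes.getD i []) (bboxes.getD j []) t = true)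

theorem pvT_mem (bboxes : List (List Int)) (t : Int) (x : Int) :
    x ∈ pvOuter bboxes t 0 [] ↔
      ∃ jn : Nat, jn < bboxes.length ∧ pvBad bboxes t jn = true ∧ x = (jn : Int) := by
  rw [(pvOuter_char bboxes t _ 0 rfl []).1 x]
  simp only [List.not_mem_nil, false_or]
  constructor
  · rintro ⟨i, h1, h2, h3, h4⟩
    refine ⟨x.toNat, by omega, ?_, by omega⟩
    rw [pvBad, decide_eq_true_iff]
    refine ⟨i.toNat, by omega, ?_⟩
    have hi : (i.toNat : Int) = i := by omega
    have hx : (x.toNat : Int) = x := by omega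
    rw [← PySem.List.pyGetD_natCast, ← PySem.List.pyGetD_natCast, hi, hx]
    exact h4
  · rintro ⟨jn, h1, h2, rfl⟩
    rw [pvBad, decide_eq_true_iff] at h2
    obtain ⟨i, hi, hsim⟩ := h2
    refine ⟨(i : Int), by omega, by omega, by omega, ?_⟩
    rw [PySem.List.pyGetD_natCast, PySem.List.pyGetD_natCast]
    exact hsim

theorem pvSorted_eq (bboxes : List (List Int)) (t : Int) :
    PySem.List.sorted (pvOuter bboxes t 0 []) id true =
      (((List.range bboxes.length).filter (pvBad bboxes t)).reverse.map (fun (k : Nat) => (k : Int))) := by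
  have hTnd : (pvOuter bboxes t 0 []).Nodup := (pvOuter_char bboxes t _ 0 rfl []).2 List.nodup_nil
  have hSnd : (PySem.List.sorted (pvOuter bboxes t 0 []) id true).Nodup :=
    (PySem.List.sorted_perm _ id true).nodup_iff.mpr hTnd
  have hCnd : (((List.range bboxes.length).filter (pvBad bboxes t)).reverse.map
      (fun k => ((k : Nat) : Int))).Nodup := by
    refine List.Nodup.map (fun a b h => by exact_mod_cast h) ?_
    rw [List.nodup_reverse]
    exact List.Nodup.filter _ List.nodup_range
  have hperm : (PySem.List.sorted (pvOuter bboxes t 0 []) id true).Perm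
      (((List.range bboxes.length).filter (pvBad bboxes t)).reverse.map (fun (k : Nat) => (k : Int))) := by
    rw [List.perm_ext_iff_of_nodup hSnd hCnd]
    intro x
    rw [PySem.List.mem_sorted, pvT_mem]
    simp only [List.mem_map, List.mem_reverse, List.mem_filter, List.mem_range]
    constructor
    · rintro ⟨jn, h1, h2, rfl⟩
      exact ⟨jn, ⟨h1, h2⟩, rfl⟩
    · rintro ⟨jn, ⟨h1, h2⟩, rfl⟩
      exact ⟨jn, h1, h2, rfl⟩
  refine List.Perm.eq_of_pairwise (le := fun (a b : Int) => b ≤ a) (fun a b _ _ h1 h2 => by omega) ?_ ?_ hperm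
  · exact PySem.List.sorted_pairwise_rev _ id
  · rw [List.pairwise_map]
    have : (((List.range bboxes.length).filter (pvBad bboxes t)).reverse).Pairwise (· > ·) := by
      rw [List.pairwise_reverse]
      exact (List.pairwise_lt_range).filter _
    exact this.imp (fun h => by omega)


theorem portA_eq_pvKeep (bboxes : List (List Int)) (t : Int) :
    removeAmbiguous bboxes t = pvKeep bboxes (pvBad bboxes t) := by
  have h0 : removeAmbiguous bboxes t =
      (PySem.List.sorted (pvOuter bboxes t 0 []) id true).foldl (fun st j =>
        match PySem.List.pop? st j with
        | some r => r.2
        | none => st) bboxes := rfl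
  rw [h0, pvSorted_eq, List.foldl_map]
  rw [pvPop_desc bboxes (((List.range bboxes.length).filter (pvBad bboxes t)).reverse)
      (by rw [List.pairwise_reverse]; exact (List.pairwise_lt_range).filter _)
      (fun j hj => by
        rw [List.mem_reverse, List.mem_filter, List.mem_range] at hj; exact hj.1)]
  apply pvKeep_congr
  intro k hk
  simp only [List.mem_reverse, List.mem_filter, List.mem_range]
  by_cases hb : pvBad bboxes t k = true
  · simp [hb, hk]
  · simp [hb, hk]

theorem pvFilterMap_of_if (q : Nat → Bool) (f : Nat → List Int) (l : List Nat) :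
    (l.filter q).map f = l.filterMap (fun j => if q j then some (f j) else none) := by
  induction l with
  | nil => rfl
  | cons a l ih =>
      rw [List.filter_cons, List.filterMap_cons]
      by_cases h : q a <;> simp [h, ih]

theorem pvKeep_eq_filter_map (l : List (List Int)) (p : Nat → Bool) :
    pvKeep l p = ((List.range l.length).filter (fun j => ! p j)).map (fun j => l.getD j []) := by
  rw [pvKeep, pvFilterMap_of_if]
  apply List.filterMap_congr
  intro j hj
  rw [List.mem_range] at hj
  by_cases h : p j
  · simp [h]
  · simp [h, List.getElem?_eq_getElem hj]

theorem pvTake_any (bboxes : List (List Int)) (t : Int) (k : Nat) (hk : k ≤ bboxes.length) :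
    ((bboxes.take k).any (fun prev => pvSim prev (bboxes.getD k []) t)) = pvBad bboxes t k := by
  rw [pvBad]
  by_cases h : ∃ i : Nat, i < k ∧ pvSim (bboxes.getD i []) (bboxes.getD k []) t = true
  · obtain ⟨i, hi, hsim⟩ := h
    rw [decide_eq_true_iff.mpr ⟨i, hi, hsim⟩ ]
    rw [List.any_eq_true]
    refine ⟨bboxes.getD i [], ?_, hsim⟩
    rw [List.mem_take_iff_getElem]
    exact ⟨i, lt_min hi (by omega), by rw [List.getD_eq_getElem _ _ (by omega)]⟩
  · rw [decide_eq_false h]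
    rw [List.any_eq_false]
    intro x hx
    rw [List.mem_take_iff_getElem] at hx
    obtain ⟨i, hi, rfl⟩ := hx
    have hi1 : i < k := lt_of_lt_of_le hi (min_le_left _ _)
    have hi2 : i < bboxes.length := lt_of_lt_of_le hi (min_le_right _ _)
    intro hsim
    exact h ⟨i, hi1, by rw [List.getD_eq_getElem _ _ hi2]; exact hsim⟩

theorem portB_eq_pvKeep (bboxes : List (List Int)) (t : Int) :
    removeAmbiguous_alt bboxes t = pvKeep bboxes (pvBad bboxes t) := by
  rw [removeAmbiguous_alt, PySem.List.foldl_append_if, List.nil_append]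
  rw [PySem.List.enumerate_eq_map_pyRange bboxes [], List.filter_map, List.map_map]
  rw [PySem.List.len_eq, PySem.List.pyRange_one, List.filter_map, List.map_map]
  rw [pvKeep_eq_filter_map]
  simp only [Int.toNat_natCast, Int.sub_zero, Function.comp_def, zero_add,
    PySem.List.slice_to_natCast, PySem.List.pyGetD_natCast]
  have h1 : List.filter
      (fun k => !(bboxes.take k).any (fun prev => pvSim prev (bboxes.getD k []) t))
      (List.range bboxes.length)
      = List.filter (fun j => ! pvBad bboxes t j) (List.range bboxes.length) := by
    apply List.filter_congr
    intro j hj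
    rw [List.mem_range] at hj
    rw [pvTake_any bboxes t j (by omega)]
  rw [h1]

-- ===== VERDICT (by name: the statement is the Claim_ definition above) =====
theorem removeAmbiguous_spec : Claim_equal_removeAmbiguous := by
  intro bboxes t _ _
  unfold Spec_removeAmbiguous
  rw [portA_eq_pvKeep, portB_eq_pvKeep]
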